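-- pv_equiv track=rewrite | github.com/satyamshivam13/HybridAI_Syntax_Error_Detection | src/static_pipeline.py | _string_start
-- ===== SOURCE A (Python) =====
-- def _string_start(code: str) -> tuple[int, int] | None:
--     line = 1
--     col = 0
--     quote = None
--     start = (1, 1)
--     escaped = False
--     for ch in code:
--         if ch == "\n":
--             if quote in {"'", '"'}:
--                 return start
--             line += 1
--             col = 0
--             escaped = False
--             continue
--         col += 1
--         if escaped:
--             escaped = False
--             continue
--         if ch == "\\" and quote:
--             escaped = True
--             continue
--         if ch in {"'", '"', "`"}:
--             if quote == ch:
--                 quote = None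
--             elif not quote:
--                 quote = ch
--                 start = (line, col)
--     return start if quote else None
-- ===== SOURCE B (Python) =====
-- def _string_start(code: str) -> tuple[int, int] | None:
--     quote = None
--     start = (1, 1)
--     segments = code.split("\n")
--     for line_no, text in enumerate(segments, 1):
--         col = 0
--         escaped = False
--         for ch in text:
--             col += 1
--             if escaped:
--                 escaped = False
--                 continue
--             if ch == "\\" and quote:
--                 escaped = True
--                 continue
--             if ch in ("'", '"', "`"):
--                 if quote == ch:
--                     quote = None
--                 elif not quote:
--                     quote = ch
--                     start = (line_no, col)
--         if line_no != len(segments):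
--             if quote in ("'", '"'):
--                 return start
--     return start if quote else None
-- ===== Notes on version B (the rewrite author's own statement) =====
-- stated objective: alternative
-- what changed: Replaced the single flat character scan with explicit line/col bookkeeping by a nested scan: split the code on newlines, enumerate line numbers, and run a per-line character scan with the inter-line unterminated-quote check applied between segments.
import Mathlib
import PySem

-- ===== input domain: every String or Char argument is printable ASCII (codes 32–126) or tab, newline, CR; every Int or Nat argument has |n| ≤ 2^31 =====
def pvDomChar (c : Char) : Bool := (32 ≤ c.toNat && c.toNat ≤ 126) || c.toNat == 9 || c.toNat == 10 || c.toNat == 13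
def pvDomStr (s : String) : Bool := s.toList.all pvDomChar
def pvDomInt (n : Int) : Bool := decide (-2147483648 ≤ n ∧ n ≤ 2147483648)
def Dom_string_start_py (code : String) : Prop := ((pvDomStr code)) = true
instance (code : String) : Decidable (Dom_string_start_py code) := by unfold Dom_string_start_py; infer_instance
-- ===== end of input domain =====

-- B rewrites A's flat scan as a nested scan over the newline-split segments; same O(n) cost, different decomposition.

-- ===== PORT A =====
-- A: one pass over the characters, maintaining line, col, quote, start, escaped;
-- early return on a newline inside ' or " quoting.
def goA : List Char → Int → Int → Option Char → (Int × Int) → Bool → Option (Int × Int)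
  | [], _, _, quote, start, _ => if quote.isSome then some start else none
  | ch :: rest, line, col, quote, start, escaped =>
    if ch = '\n' then
      if quote = some '\'' ∨ quote = some '"' then some start
      else goA rest (line + 1) 0 quote start false
    else
      let col' := col + 1
      if escaped then goA rest line col' quote start false
      else if ch = '\\' ∧ quote.isSome then goA rest line col' quote start true
      else if ch = '\'' ∨ ch = '"' ∨ ch = '`' then
        if quote = some ch then goA rest line col' none start false
        else if quote = none then goA rest line col' (some ch) (line, col') false
        else goA rest line col' quote start false
      else goA rest line col' quote start false

def string_start_py (code : String) : Option (Int × Int) :=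
  goA code.toList 1 0 none (1, 1) false

-- ===== PORT B =====
-- hand-written port of code.split("\n") (exact: splits on every '\n', keeps empty segments)
def splitNL : List Char → List (List Char)
  | [] => [[]]
  | c :: cs =>
    if c = '\n' then [] :: splitNL cs
    else
      match splitNL cs with
      | [] => [[c]]        -- unreachable: splitNL never returns []
      | h :: t => (c :: h) :: t

-- B's inner loop: scan one segment's characters; col and escaped are the loop state
-- (initialised to 0 / false by the caller, as in Source B).
def goBLine : List Char → Int → Int → Option Char → (Int × Int) → Bool → Option Char × (Int × Int)
  | [], _, _, quote, start, _ => (quote, start)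
  | ch :: rest, lineNo, col, quote, start, escaped =>
    let col' := col + 1
    if escaped then goBLine rest lineNo col' quote start false
    else if ch = '\\' ∧ quote.isSome then goBLine rest lineNo col' quote start true
    else if ch = '\'' ∨ ch = '"' ∨ ch = '`' then
      if quote = some ch then goBLine rest lineNo col' none start false
      else if quote = none then goBLine rest lineNo col' (some ch) (lineNo, col') false
      else goBLine rest lineNo col' quote start false
    else goBLine rest lineNo col' quote start false

-- B's outer loop: enumerate(segments, 1); between segments (not after the last)
-- return start when an unterminated ' or " quote is open.
def goBLines : List (List Char) → Int → Option Char → (Int × Int) → Option (Int × Int)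
  | [], _, quote, start => if quote.isSome then some start else none
  | [text], lineNo, quote, start =>
    let (q, s) := goBLine text lineNo 0 quote start false
    if q.isSome then some s else none
  | text :: rest, lineNo, quote, start =>
    let (q, s) := goBLine text lineNo 0 quote start false
    if q = some '\'' ∨ q = some '"' then some s
    else goBLines rest (lineNo + 1) q s

def string_start_py_alt (code : String) : Option (Int × Int) :=
  goBLines (splitNL code.toList) 1 none (1, 1)

-- ===== PRECONDITION & SPEC =====
def Spec_string_start_py (code : String) (out : Option (Int × Int)) : Prop := out = string_start_py_alt code
instance (code : String) (out : Option (Int × Int)) : Decidable (Spec_string_start_py code out) := by unfold Spec_string_start_py; infer_instance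

-- ===== CLAIM (what is proved, stated in full; the proofs are below) =====
def Claim_equal_string_start_py : Prop := ∀ (code : String), Dom_string_start_py code → Spec_string_start_py code (string_start_py code)

-- ===== LEMMAS AND PROOFS =====

-- generalisation of goBLines that lets the FIRST segment start mid-line (arbitrary col, escaped)
def goBGen : List (List Char) → Int → Int → Option Char → (Int × Int) → Bool → Option (Int × Int)
  | [], _, _, quote, start, _ => if quote.isSome then some start else none
  | [text], lineNo, col, quote, start, escaped =>
    let (q, s) := goBLine text lineNo col quote start escaped
    if q.isSome then some s else none
  | text :: rest, lineNo, col, quote, start, escaped =>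
    let (q, s) := goBLine text lineNo col quote start escaped
    if q = some '\'' ∨ q = some '"' then some s
    else goBGen rest (lineNo + 1) 0 q s false

theorem splitNL_ne_nil (cs : List Char) : splitNL cs ≠ [] := by
  cases cs with
  | nil => simp [splitNL]
  | cons c cs =>
    simp only [splitNL]
    split
    · simp
    · split <;> simp

theorem goBGen_zero_false (segs : List (List Char)) (lineNo : Int) (quote : Option Char)
    (start : Int × Int) : goBGen segs lineNo 0 quote start false = goBLines segs lineNo quote start := by
  induction segs generalizing lineNo quote start with
  | nil => rfl
  | cons text rest ih =>
    cases rest with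
    | nil => rfl
    | cons t2 r2 =>
      simp only [goBGen, goBLines]
      split
      · rfl
      · exact ih _ _ _

-- one non-newline character steps the head segment of goBGen exactly like goA steps its state
theorem goBGen_cons_char (c : Char) (h : List Char) (t : List (List Char)) (line col : Int)
    (q : Option Char) (s : Int × Int) (e : Bool) :
    goBGen ((c :: h) :: t) line col q s e =
      (if e then goBGen (h :: t) line (col + 1) q s false
       else if c = '\\' ∧ q.isSome then goBGen (h :: t) line (col + 1) q s true
       else if c = '\'' ∨ c = '"' ∨ c = '`' then
         if q = some c then goBGen (h :: t) line (col + 1) none s false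
         else if q = none then goBGen (h :: t) line (col + 1) (some c) (line, col + 1) false
         else goBGen (h :: t) line (col + 1) q s false
       else goBGen (h :: t) line (col + 1) q s false) := by
  cases t with
  | nil =>
    simp only [goBGen, goBLine]
    split_ifs <;> rfl
  | cons t2 r2 =>
    simp only [goBGen, goBLine]
    split_ifs <;> rfl

theorem goA_eq_goBGen (cs : List Char) (line col : Int) (quote : Option Char)
    (start : Int × Int) (escaped : Bool) :
    goA cs line col quote start escaped = goBGen (splitNL cs) line col quote start escaped := by
  induction cs generalizing line col quote start escaped with
  | nil => rfl
  | cons c rest ih =>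
    cases hsp : splitNL rest with
    | nil => exact absurd hsp (splitNL_ne_nil rest)
    | cons h t =>
      by_cases hnl : c = '\n'
      · subst hnl
        have hs : splitNL ('\n' :: rest) = [] :: h :: t := by simp [splitNL, hsp]
        rw [hs]
        simp only [goA, goBGen, goBLine]
        split_ifs <;> first | rfl | rw [ih, hsp]
      · have hs : splitNL (c :: rest) = (c :: h) :: t := by simp [splitNL, hnl, hsp]
        rw [hs, goBGen_cons_char]
        simp only [goA, if_neg hnl]
        have ih' : ∀ (l co : Int) (q : Option Char) (s : Int × Int) (e : Bool),
            goA rest l co q s e = goBGen (h :: t) l co q s e := by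
          intro l co q s e; rw [ih, hsp]
        split_ifs <;> apply ih'

-- ===== VERDICT (by name: the statement is the Claim_ definition above) =====
theorem string_start_py_spec : Claim_equal_string_start_py := by
  intro code _
  unfold Spec_string_start_py string_start_py string_start_py_alt
  rw [goA_eq_goBGen, goBGen_zero_false]
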